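-- pv_equiv track=rewrite | github.com/yeungadrian/Voxing | src/voxing/viz/_waveform.py | bar_columns
-- ===== SOURCE A (Python) =====
-- BAR_GAP = 1
--
-- def bar_columns(width: int) -> tuple[list[int | None], int]:
--     """Map each column to a bar index or None for gaps; return mapping and num_bars."""
--     num_bars = max(1, (width + BAR_GAP) // (1 + BAR_GAP))
--     mapping: list[int | None] = [None] * width
--     for b in range(num_bars):
--         col = b * (1 + BAR_GAP)
--         if 0 <= col < width:
--             mapping[col] = b
--     return mapping, num_bars
-- ===== SOURCE B (Python) =====
-- BAR_GAP = 1
--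
-- def bar_columns(width: int) -> tuple[list[int | None], int]:
--     """Map each column to a bar index or None for gaps; return mapping and num_bars."""
--     step = 1 + BAR_GAP
--     num_bars = max(1, (width + BAR_GAP) // step)
--     mapping = [c // step if c % step == 0 and c // step < num_bars else None
--                for c in range(width)]
--     return mapping, num_bars
-- ===== Notes on version B (the rewrite author's own statement) =====
-- stated objective: simpler
-- what changed: Replaces the scatter loop (preallocate a None list, write bar indices into even columns) with a single gather comprehension that decides each column's value from its own index.
import Mathlib
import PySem

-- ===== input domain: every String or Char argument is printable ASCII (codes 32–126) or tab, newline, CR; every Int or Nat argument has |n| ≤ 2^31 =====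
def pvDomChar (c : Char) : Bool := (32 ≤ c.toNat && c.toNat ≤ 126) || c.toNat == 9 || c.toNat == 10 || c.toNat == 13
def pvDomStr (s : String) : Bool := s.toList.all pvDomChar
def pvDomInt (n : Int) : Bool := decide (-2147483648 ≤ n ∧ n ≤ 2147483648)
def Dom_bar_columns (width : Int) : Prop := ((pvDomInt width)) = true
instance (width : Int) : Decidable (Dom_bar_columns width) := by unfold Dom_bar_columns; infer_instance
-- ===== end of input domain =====

-- B replaces A's scatter loop (preallocate Nones, write bar indices at even columns)
-- with a single gather pass computing each column's value from its own index; objective: simpler.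

-- ===== PORT A =====
def bar_columns (width : Int) : List (Option Int) × Int :=
  let num_bars : Int := max 1 (PySem.Int.floordiv (width + 1) (1 + 1))
  let mapping : List (Option Int) := List.replicate width.toNat none
  let mapping := (List.range num_bars.toNat).foldl (fun m (b : Nat) =>
    let col : Int := (b : Int) * (1 + 1)
    if 0 ≤ col ∧ col < width then m.set col.toNat (some (b : Int)) else m) mapping
  (mapping, num_bars)

-- ===== PORT B =====
def bar_columns_alt (width : Int) : List (Option Int) × Int :=
  let step : Int := 1 + 1
  let num_bars : Int := max 1 (PySem.Int.floordiv (width + 1) step)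
  ((List.range width.toNat).map (fun (c : Nat) =>
      if PySem.Int.mod (c : Int) step = 0 ∧ PySem.Int.floordiv (c : Int) step < num_bars
      then some (PySem.Int.floordiv (c : Int) step) else none),
   num_bars)

-- ===== PRECONDITION & SPEC =====
def Spec_bar_columns (width : Int) (out : List (Option Int) × Int) : Prop := out = bar_columns_alt width
instance (width : Int) (out : List (Option Int) × Int) : Decidable (Spec_bar_columns width out) := by unfold Spec_bar_columns; infer_instance

-- ===== CLAIM (what is proved, stated in full; the proofs are below) =====
def Claim_equal_bar_columns : Prop := ∀ (width : Int), Dom_bar_columns width → Spec_bar_columns width (bar_columns width)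

-- ===== LEMMAS AND PROOFS =====

-- The scatter fold over the first k bars equals a gather map over the columns.
theorem bar_fold_eq_map (width : Int) (k : Nat) :
    (List.range k).foldl (fun m (b : Nat) =>
        let col : Int := (b : Int) * (1 + 1)
        if 0 ≤ col ∧ col < width then m.set col.toNat (some (b : Int)) else m)
      (List.replicate width.toNat none)
    = (List.range width.toNat).map (fun (c : Nat) =>
        if c % 2 = 0 ∧ c / 2 < k then some ((c / 2 : Nat) : Int) else none) := by
  induction k with
  | zero =>
    simp only [List.range_zero]
    apply List.ext_getElem
    · simp
    · intro i h1 h2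
      simp
  | succ k ih =>
    rw [List.range_succ, List.foldl_append, ih]
    simp only [List.foldl_cons, List.foldl_nil]
    by_cases hg : (0 : Int) ≤ (k : Int) * (1 + 1) ∧ (k : Int) * (1 + 1) < width
    · rw [if_pos hg]
      apply List.ext_getElem
      · simp
      · intro i h1 h2
        have hidx : ((k : Int) * (1 + 1)).toNat = 2 * k := by omega
        have hin : 2 * k < width.toNat := by omega
        rw [List.getElem_set]
        simp only [hidx, List.getElem_map, List.getElem_range]
        by_cases he : 2 * k = i
        · subst he
          rw [if_pos rfl]
          have hcond : (2 * k) % 2 = 0 ∧ (2 * k) / 2 < k + 1 := by omega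
          rw [if_pos hcond]
          congr 1
          omega
        · rw [if_neg he]
          have hiw : i < width.toNat := by simpa using h1
          by_cases hc : i % 2 = 0 ∧ i / 2 < k
          · rw [if_pos hc, if_pos ⟨hc.1, by omega⟩]
          · rw [if_neg hc, if_neg (by omega)]
    · rw [if_neg hg]
      apply List.map_congr_left
      intro c hc
      have hcw : c < width.toNat := List.mem_range.mp hc
      have : ¬ ((k : Int) * (1 + 1) < width) := by
        intro h; exact hg ⟨by positivity, h⟩
      have hcb : c < 2 * k := by omega
      by_cases h2 : c % 2 = 0 ∧ c / 2 < k
      · rw [if_pos h2, if_pos ⟨h2.1, by omega⟩]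
      · rw [if_neg h2, if_neg (by omega)]

-- ===== VERDICT (by name: the statement is the Claim_ definition above) =====
theorem bar_columns_spec : Claim_equal_bar_columns := by
  intro width _
  unfold Spec_bar_columns bar_columns bar_columns_alt
  simp only
  set nb : Int := max 1 (PySem.Int.floordiv (width + 1) (1 + 1)) with hnb
  have hnb1 : 1 ≤ nb := le_max_left _ _
  refine Prod.ext ?_ rfl
  simp only
  rw [bar_fold_eq_map width nb.toNat]
  apply List.map_congr_left
  intro c hc
  have hmod : PySem.Int.mod (c : Int) (1 + 1) = ((c % 2 : Nat) : Int) := by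
    exact_mod_cast PySem.Int.mod_natCast c 2
  have hdiv : PySem.Int.floordiv (c : Int) (1 + 1) = ((c / 2 : Nat) : Int) := by
    exact_mod_cast PySem.Int.floordiv_natCast c 2
  rw [hmod, hdiv]
  by_cases h : c % 2 = 0 ∧ c / 2 < nb.toNat
  · rw [if_pos h, if_pos ⟨by exact_mod_cast h.1, by omega⟩]
  · rw [if_neg h, if_neg (by push_cast; omega)]
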